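-- pv_equiv track=rewrite | github.com/FrancisSimple/capstone | backend/src/middleware/logging_middleware.py | filter_sensitive_data
-- ===== SOURCE A (Python) =====
-- from typing import Dict, Any, List
--
-- def filter_sensitive_data(
--     data: Dict[str, Any], sensitive_fields: List[str]
-- ) -> Dict[str, Any]:
--     """
--     Redacts sensitive fields from a dictionary.
--     :param data: The original data dictionary.
--     :param sensitive_fields: List of fields to redact.
--     :return: Data dictionary with sensitive fields redacted.
--     """
--     filtered_data = data.copy()
--     for field in sensitive_fields:
--         if field in filtered_data:
--             filtered_data[field] = "REDACTED"
--     return filtered_data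
-- ===== SOURCE B (Python) =====
-- from typing import Dict, Any, List
--
-- def filter_sensitive_data(
--     data: Dict[str, Any], sensitive_fields: List[str]
-- ) -> Dict[str, Any]:
--     sensitive = set(sensitive_fields)
--     return {k: ("REDACTED" if k in sensitive else v) for k, v in data.items()}
-- ===== Notes on version B (the rewrite author's own statement) =====
-- stated objective: idiomatic
-- what changed: Instead of copying the dict and looping over sensitive_fields with per-field membership tests and in-place overwrites, B builds the result in one dict comprehension over data.items(), testing each key against a set of the sensitive fields built once.
import Mathlib
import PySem

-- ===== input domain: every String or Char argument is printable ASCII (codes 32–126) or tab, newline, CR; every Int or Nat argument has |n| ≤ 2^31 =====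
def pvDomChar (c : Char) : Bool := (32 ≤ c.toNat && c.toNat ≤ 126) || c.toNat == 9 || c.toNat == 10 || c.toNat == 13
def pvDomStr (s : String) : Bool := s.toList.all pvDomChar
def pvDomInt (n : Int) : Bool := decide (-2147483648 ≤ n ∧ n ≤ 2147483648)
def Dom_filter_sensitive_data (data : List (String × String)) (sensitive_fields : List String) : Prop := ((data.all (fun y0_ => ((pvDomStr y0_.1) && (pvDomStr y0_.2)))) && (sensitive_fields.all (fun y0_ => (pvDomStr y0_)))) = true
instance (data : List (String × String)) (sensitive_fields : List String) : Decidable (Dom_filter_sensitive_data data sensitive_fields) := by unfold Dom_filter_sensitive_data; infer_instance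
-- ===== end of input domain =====

-- B replaces A's copy-then-loop-over-fields mutation with one pass over the data
-- entries, redacting each key that occurs in sensitive_fields (idiomatic; same cost).

-- ===== PORT A =====
-- filtered_data = data.copy(); for field in sensitive_fields: if field in filtered_data: filtered_data[field] = "REDACTED"
def filter_sensitive_data (data : List (String × String)) (sensitive_fields : List String) : List (String × String) :=
  sensitive_fields.foldl
    (fun filtered field =>
      if filtered.any (fun p => p.1 == field) then
        -- overwrite in place (key position kept), as dict assignment on an existing key
        filtered.map (fun p => if p.1 == field then (field, "REDACTED") else p)
      else filtered)
    data

-- ===== PORT B =====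
-- sensitive = set(sensitive_fields); {k: ("REDACTED" if k in sensitive else v) for k, v in data.items()}
def filter_sensitive_data_alt (data : List (String × String)) (sensitive_fields : List String) : List (String × String) :=
  let sensitive : PySem.Set String := PySem.Set.ofList sensitive_fields
  data.map (fun p => (p.1, if sensitive.contains p.1 then "REDACTED" else p.2))

-- ===== PRECONDITION & SPEC =====
def Spec_filter_sensitive_data (data : List (String × String)) (sensitive_fields : List String) (out : List (String × String)) : Prop := out = filter_sensitive_data_alt data sensitive_fields
instance (data : List (String × String)) (sensitive_fields : List String) (out : List (String × String)) : Decidable (Spec_filter_sensitive_data data sensitive_fields out) := by unfold Spec_filter_sensitive_data; infer_instance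

-- ===== CLAIM (what is proved, stated in full; the proofs are below) =====
def Claim_equal_filter_sensitive_data : Prop := ∀ (data : List (String × String)) (sensitive_fields : List String), Dom_filter_sensitive_data data sensitive_fields → Spec_filter_sensitive_data data sensitive_fields (filter_sensitive_data data sensitive_fields)

-- ===== LEMMAS AND PROOFS =====

-- A's loop over the fields computes the pointwise redaction B performs in one pass.
theorem foldl_redact_eq (sensitive_fields : List String) :
    ∀ (data : List (String × String)),
      sensitive_fields.foldl
        (fun filtered field =>
          if filtered.any (fun p => p.1 == field) then
            filtered.map (fun p => if p.1 == field then (field, "REDACTED") else p)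
          else filtered)
        data
      = data.map (fun p => (p.1, if sensitive_fields.contains p.1 then "REDACTED" else p.2)) := by
  induction sensitive_fields with
  | nil =>
    intro data
    simp
  | cons f fs ih =>
    intro data
    rw [List.foldl_cons]
    by_cases h : data.any (fun p => p.1 == f)
    · rw [if_pos h, ih, List.map_map]
      apply List.map_congr_left
      intro p _
      by_cases hp : p.1 = f
      · simp [Function.comp, hp]
      · simp [Function.comp, hp]
    · rw [if_neg h, ih]
      apply List.map_congr_left
      intro p hp
      have hne : p.1 ≠ f := by
        intro he
        exact h (List.any_eq_true.mpr ⟨p, hp, by simp [he]⟩)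
      simp [hne]

-- ===== VERDICT (by name: the statement is the Claim_ definition above) =====
theorem filter_sensitive_data_spec : Claim_equal_filter_sensitive_data := by
  intro data sensitive_fields _
  unfold Spec_filter_sensitive_data filter_sensitive_data filter_sensitive_data_alt
  rw [foldl_redact_eq sensitive_fields data]
  apply List.map_congr_left
  intro p _
  have : (PySem.Set.ofList sensitive_fields).contains p.1 = sensitive_fields.contains p.1 := by
    simp [List.contains_eq_mem, PySem.Set.mem_ofList]
  rw [this]
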